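-- pv_equiv track=rewrite | github.com/dancxjo/psyched | modules/pilot/packages/pilot/pilot/prompt_builder.py | _group_actions_by_module
-- ===== SOURCE A (Python) =====
-- from typing import Any, Dict, Iterable, List, Mapping, Sequence, Tuple
--
-- def _group_actions_by_module(actions: Iterable[str]) -> Dict[str, List[str]]:
--     grouped: Dict[str, List[str]] = {}
--     for action in actions:
--         if not action:
--             continue
--         module, _, name = action.partition(".")
--         if not name:
--             module, name = "shared", action
--         grouped.setdefault(module, []).append(name)
--
--     for module_actions in grouped.values():
--         module_actions.sort()
--
--     return dict(sorted(grouped.items()))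
-- ===== SOURCE B (Python) =====
-- from typing import Dict, Iterable, List
--
--
-- def _group_actions_by_module(actions: Iterable[str]) -> Dict[str, List[str]]:
--     pairs = []
--     for action in actions:
--         if not action:
--             continue
--         module, _, name = action.partition(".")
--         if not name:
--             module, name = "shared", action
--         pairs.append((module, name))
--     pairs.sort()
--     grouped: Dict[str, List[str]] = {}
--     for module, name in pairs:
--         grouped.setdefault(module, []).append(name)
--     return grouped
-- ===== Notes on version B (the rewrite author's own statement) =====
-- stated objective: alternative
-- what changed: Instead of grouping into a dict first and then sorting every group plus the key order (one sort per group + one over the items), B parses into a flat list of (module, name) pairs, sorts that list once lexicographically, and builds the dict in one pass over the sorted pairs, so keys and group values emerge already sorted with a single sort.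
import Mathlib
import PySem

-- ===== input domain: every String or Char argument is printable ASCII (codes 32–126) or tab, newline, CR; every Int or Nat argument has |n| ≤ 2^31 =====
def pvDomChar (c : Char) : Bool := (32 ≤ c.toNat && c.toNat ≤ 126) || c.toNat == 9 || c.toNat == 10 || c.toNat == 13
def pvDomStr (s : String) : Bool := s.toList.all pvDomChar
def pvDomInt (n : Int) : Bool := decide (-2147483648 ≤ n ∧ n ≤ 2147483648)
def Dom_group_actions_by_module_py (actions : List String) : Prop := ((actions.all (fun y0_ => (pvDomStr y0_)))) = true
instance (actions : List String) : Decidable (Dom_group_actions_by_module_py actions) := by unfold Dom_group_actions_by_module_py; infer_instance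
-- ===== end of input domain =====

-- B replaces A's per-group sorts plus final key sort with ONE lexicographic sort of the parsed
-- (module, name) pairs followed by a single grouping pass (same return value; A mutates nothing observable).

-- shared parse helper: `module, _, name = action.partition(".")` (exact: first '.' splits; no '.' → ("", ""))
def pvPartitionDot (s : String) : String × String × String :=
  let cs := s.toList
  let pre := cs.takeWhile (fun c => c ≠ '.')
  if pre.length = cs.length then (s, "", "")
  else (String.ofList pre, ".", String.ofList (cs.drop (pre.length + 1)))

-- the parse both Pythons perform verbatim: partition, then the `if not name` fallback to "shared"
def pvParse (action : String) : String × String :=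
  let m := pvPartitionDot action
  if m.2.2 = "" then ("shared", action) else (m.1, m.2.2)

-- ===== PORT A =====
def group_actions_by_module_py (actions : List String) : List (String × List String) :=
  let grouped := actions.foldl (fun d action =>
    if action = "" then d
    else
      let mn := pvParse action
      d.modify mn.1 [] (fun v => v ++ [mn.2])) PySem.Dict.empty
  -- each value list sorted in place, then dict(sorted(grouped.items())); the keys are distinct,
  -- so Python's tuple comparison in that final sort orders by the key alone (exact here)
  PySem.List.sorted (grouped.items.map (fun p => (p.1, PySem.List.sorted p.2 (fun x => x)))) (fun p => p.1)

-- ===== PORT B =====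
def group_actions_by_module_py_alt (actions : List String) : List (String × List String) :=
  let pairs := actions.foldl (fun ps action =>
    if action = "" then ps else ps ++ [pvParse action]) []
  let sortedPairs := PySem.List.sorted2 pairs (fun p => p.1) (fun p => p.2)
  (sortedPairs.foldl (fun d p => d.modify p.1 [] (fun v => v ++ [p.2])) PySem.Dict.empty).items

-- ===== PRECONDITION & SPEC =====
def Spec_group_actions_by_module_py (actions : List String) (out : List (String × List String)) : Prop := out = group_actions_by_module_py_alt actions
instance (actions : List String) (out : List (String × List String)) : Decidable (Spec_group_actions_by_module_py actions out) := by unfold Spec_group_actions_by_module_py; infer_instance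

-- ===== CLAIM (what is proved, stated in full; the proofs are below) =====
def Claim_equal_group_actions_by_module_py : Prop := ∀ (actions : List String), Dom_group_actions_by_module_py actions → Spec_group_actions_by_module_py actions (group_actions_by_module_py actions)

-- ===== LEMMAS AND PROOFS =====

-- one parsed pair per non-empty action
def pvG (a : String) : List (String × String) := if a = "" then [] else [pvParse a]

-- Python's `(a, b) <= (c, d)` on the pairs we sort
def pvLexLe (a b : String × String) : Prop := a.1 < b.1 ∨ (a.1 = b.1 ∧ a.2 ≤ b.2)

-- the Bool comparison sorted2 uses (Python's tuple `<` on our pairs)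
def bf (a b : String × String) : Bool :=
  decide (a.1 < b.1) || (!decide (b.1 < a.1) && decide (a.2 < b.2))

theorem bf_true {a b : String × String} (h : bf a b = true) : pvLexLe a b := by
  unfold bf at h; unfold pvLexLe
  simp only [Bool.or_eq_true, Bool.and_eq_true, Bool.not_eq_true', decide_eq_true_eq, decide_eq_false_iff_not] at h
  rcases h with h | ⟨h1, h2⟩
  · exact Or.inl h
  · rcases lt_or_ge a.1 b.1 with hl | hl
    · exact Or.inl hl
    · exact Or.inr ⟨le_antisymm (le_of_not_gt h1) hl, le_of_lt h2⟩

theorem bf_false {a b : String × String} (h : bf a b = false) : pvLexLe b a := by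
  unfold bf at h; unfold pvLexLe
  simp only [Bool.or_eq_false_iff, Bool.and_eq_false_iff, Bool.not_eq_false', decide_eq_true_eq, decide_eq_false_iff_not] at h
  rcases h with ⟨h1, h2⟩
  rcases h2 with h2 | h2
  · exact Or.inl h2
  · rcases lt_or_ge b.1 a.1 with hl | hl
    · exact Or.inl hl
    · exact Or.inr ⟨le_antisymm (le_of_not_gt h1) hl, le_of_not_gt h2⟩

theorem pvLexLe_trans {a b c : String × String} (h1 : pvLexLe a b) (h2 : pvLexLe b c) : pvLexLe a c := by
  unfold pvLexLe at *
  rcases h1 with h1 | ⟨e1, l1⟩ <;> rcases h2 with h2 | ⟨e2, l2⟩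
  · exact Or.inl (lt_trans h1 h2)
  · exact Or.inl (e2 ▸ h1)
  · exact Or.inl (e1 ▸ h2)
  · exact Or.inr ⟨e1.trans e2, le_trans l1 l2⟩

theorem insertBy_pairwise_lex (x : String × String) (ys : List (String × String))
    (h : List.Pairwise pvLexLe ys) : List.Pairwise pvLexLe (PySem.List.insertBy bf x ys) := by
  induction ys with
  | nil => simp [PySem.List.insertBy]
  | cons y ys ih =>
    rw [List.pairwise_cons] at h
    by_cases hb : bf x y = true
    · rw [show PySem.List.insertBy bf x (y :: ys) = x :: y :: ys by simp [PySem.List.insertBy, hb]]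
      refine List.Pairwise.cons ?_ (List.Pairwise.cons h.1 h.2)
      intro z hz
      rw [List.mem_cons] at hz
      rcases hz with rfl | hz
      · exact bf_true hb
      · exact pvLexLe_trans (bf_true hb) (h.1 z hz)
    · rw [show PySem.List.insertBy bf x (y :: ys) = y :: PySem.List.insertBy bf x ys by
        simp [PySem.List.insertBy, hb]]
      refine List.Pairwise.cons ?_ (ih h.2)
      intro z hz
      rw [PySem.List.mem_insertBy] at hz
      rcases hz with rfl | hz
      · exact bf_false (by simpa using hb)
      · exact h.1 z hz

theorem foldl_insertBy_pairwise_lex (ps acc : List (String × String))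
    (h : List.Pairwise pvLexLe acc) :
    List.Pairwise pvLexLe (ps.foldl (fun acc x => PySem.List.insertBy bf x acc) acc) := by
  induction ps generalizing acc with
  | nil => exact h
  | cons p ps ih => exact ih _ (insertBy_pairwise_lex p acc h)

theorem sorted2_pairwise_lex (ps : List (String × String)) :
    List.Pairwise pvLexLe (PySem.List.sorted2 ps (fun p => p.1) (fun p => p.2)) :=
  foldl_insertBy_pairwise_lex ps [] (by simp)

def pvVals (l : List (String × String)) (k : String) : List String :=
  (l.filter (fun p => p.1 == k)).map (fun p => p.2)

theorem vals_pairwise (qs : List (String × String)) (k : String)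
    (h : List.Pairwise pvLexLe qs) : List.Pairwise (· ≤ ·) (pvVals qs k) := by
  unfold pvVals
  rw [List.pairwise_map]
  have h1 : List.Pairwise pvLexLe (qs.filter (fun p => p.1 == k)) :=
    h.sublist List.filter_sublist
  refine h1.imp_of_mem ?_
  intro a b ha hb hab
  have hak : a.1 = k := by simpa using (List.of_mem_filter ha)
  have hbk : b.1 = k := by simpa using (List.of_mem_filter hb)
  rcases hab with h2 | ⟨_, h2⟩
  · rw [hak, hbk] at h2; exact absurd h2 (lt_irrefl k)
  · exact h2

theorem vals_perm (qs ps : List (String × String)) (k : String) (h : qs.Perm ps) :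
    (pvVals qs k).Perm (pvVals ps k) := (h.filter _).map _

theorem ofList_sublist_aux {α : Type} [BEq α] (xs acc : List α) :
    ∃ t, List.foldl PySem.Set.add acc xs = acc ++ t ∧ t.Sublist xs := by
  induction xs generalizing acc with
  | nil => exact ⟨[], by simp⟩
  | cons x xs ih =>
    simp only [List.foldl_cons]
    by_cases hc : acc.contains x = true
    · obtain ⟨t, ht, hs⟩ := ih acc
      exact ⟨t, by rwa [show PySem.Set.add acc x = acc by simp [PySem.Set.add, hc]], hs.cons x⟩
    · obtain ⟨t, ht, hs⟩ := ih (acc ++ [x])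
      refine ⟨x :: t, ?_, hs.cons₂ x⟩
      rw [show PySem.Set.add acc x = acc ++ [x] by simp [PySem.Set.add, hc]]
      rw [ht, List.append_assoc]; rfl

theorem ofList_sublist {α : Type} [BEq α] (xs : List α) : (PySem.Set.ofList xs).Sublist xs := by
  obtain ⟨t, ht, hs⟩ := ofList_sublist_aux xs []
  rw [show PySem.Set.ofList xs = List.foldl PySem.Set.add [] xs from rfl, ht]
  simpa using hs

theorem ofList_pairwise_lt (xs : List String) (h : List.Pairwise (· ≤ ·) xs) :
    List.Pairwise (· < ·) (PySem.Set.ofList xs) := by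
  have h1 : List.Pairwise (· ≤ ·) (PySem.Set.ofList xs) := h.sublist (ofList_sublist xs)
  have h2 : List.Pairwise (· ≠ ·) (PySem.Set.ofList xs) := PySem.Set.nodup_ofList xs
  exact (h1.and h2).imp (fun hab => lt_of_le_of_ne hab.1 hab.2)

theorem ofList_perm {α : Type} [BEq α] [LawfulBEq α] {xs ys : List α} (h : xs.Perm ys) :
    (PySem.Set.ofList xs).Perm (PySem.Set.ofList ys) := by
  rw [List.perm_ext_iff_of_nodup (PySem.Set.nodup_ofList xs) (PySem.Set.nodup_ofList ys)]
  intro a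
  rw [PySem.Set.mem_ofList, PySem.Set.mem_ofList]
  exact ⟨fun hm => h.mem_iff.mp hm, fun hm => h.mem_iff.mpr hm⟩


-- the items of the grouping dict built from pair list l
theorem items_dictOf (l : List (String × String)) :
    (l.foldl (fun d p => d.modify p.1 [] (fun v => v ++ [p.2])) PySem.Dict.empty).items
      = (PySem.Set.ofList (l.map (fun p => p.1))).map (fun k => (k, pvVals l k)) := by
  have hnd : (l.foldl (fun d p => d.modify p.1 [] (fun v => v ++ [p.2])) PySem.Dict.empty).keys.Nodup :=
    PySem.Dict.nodup_keys_foldl_modify_key l (fun p => p.1) [] (fun _ p v => v ++ [p.2])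
      PySem.Dict.empty (by simp [PySem.Dict.keys_empty])
  rw [PySem.Dict.items_eq_map_keys _ hnd []]
  have hk : (l.foldl (fun d p => d.modify p.1 [] (fun v => v ++ [p.2])) PySem.Dict.empty).keys
      = PySem.Set.ofList (l.map (fun p => p.1)) := by
    rw [PySem.Dict.keys_foldl_modify_key l (fun p => p.1) [] (fun _ p v => v ++ [p.2])]
    rw [PySem.Dict.keys_empty, PySem.Set.update_nil_left]
  rw [hk]
  refine List.map_congr_left ?_
  intro k _
  rw [PySem.Dict.getD_foldl_modify_append l PySem.Dict.empty k]
  rw [PySem.Dict.getD_empty]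
  rfl

-- A's dict-building loop over actions is the pair-list fold over the parsed pairs
theorem foldlA_eq (actions : List String) (d : PySem.Dict String (List String)) :
    actions.foldl (fun d action =>
        if action = "" then d
        else
          let mn := pvParse action
          d.modify mn.1 [] (fun v => v ++ [mn.2])) d
      = (actions.flatMap pvG).foldl (fun d p => d.modify p.1 [] (fun v => v ++ [p.2])) d := by
  induction actions generalizing d with
  | nil => rfl
  | cons a as ih =>
    by_cases ha : a = "" <;> simp [pvG, ha, ih]

-- B's pair-collecting loop is the same parsed pair list
theorem pairsB_eq (actions : List String) :
    actions.foldl (fun ps action => if action = "" then ps else ps ++ [pvParse action]) []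
      = actions.flatMap pvG := by
  have : ∀ (acc : List (String × String)), actions.foldl
      (fun ps action => if action = "" then ps else ps ++ [pvParse action]) acc
      = acc ++ actions.flatMap pvG := by
    intro acc
    rw [← PySem.List.foldl_append_eq_flatMap pvG actions acc]
    congr 1
    funext ps a
    by_cases ha : a = "" <;> simp [pvG, ha]
  simpa using this []

theorem group_actions_by_module_py_spec : Claim_equal_group_actions_by_module_py := by
  intro actions _
  unfold Spec_group_actions_by_module_py group_actions_by_module_py group_actions_by_module_py_alt
  rw [foldlA_eq, pairsB_eq]
  have hq_perm : (PySem.List.sorted2 (actions.flatMap pvG) (fun p => p.1) (fun p => p.2)).Perm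
      (actions.flatMap pvG) := PySem.List.sorted2_perm _ _ _ _
  have hq_pair := sorted2_pairwise_lex (actions.flatMap pvG)
  simp only [items_dictOf, List.map_map]
  have hvals : ∀ k, pvVals (PySem.List.sorted2 (actions.flatMap pvG) (fun p => p.1) (fun p => p.2)) k
      = PySem.List.sorted (pvVals (actions.flatMap pvG) k) (fun x => x) := fun k =>
    (PySem.List.sorted_id_eq_of_perm_of_pairwise _ _
      (vals_perm _ _ k hq_perm) (vals_pairwise _ k hq_pair)).symm
  refine PySem.List.sorted_eq_of_perm_of_pairwise_lt _ _ _ ?_ ?_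
  · refine List.Perm.trans (List.Perm.map _ (ofList_perm (hq_perm.map _))) ?_
    refine List.Perm.of_eq ?_
    refine List.map_congr_left ?_
    intro k _
    simp only [Function.comp, hvals k]
  · rw [List.pairwise_map]
    have hle : List.Pairwise (· ≤ ·)
        ((PySem.List.sorted2 (actions.flatMap pvG) (fun p => p.1) (fun p => p.2)).map (fun p => p.1)) := by
      rw [List.pairwise_map]
      refine hq_pair.imp ?_
      intro a b hab
      rcases hab with h | ⟨h, _⟩
      · exact le_of_lt h
      · exact le_of_eq h
    exact ofList_pairwise_lt _ hle
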